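-- pv_equiv track=rewrite | github.com/creatub/python-programmers | Heap_(Fail)1st_Spicy_deque.py | solution
-- ===== SOURCE A (Python) =====
-- from collections import deque
--
-- def solution(scoville, K):
--     scoville.sort()
--     dq = deque(scoville)
--     answer = 0
--     while any(x<K for x in dq):
--         if len(dq) <= 1:
--             return -1
--         i = dq.popleft()
--         dq[0] = i + dq[0]*2
--         dq = deque(sorted(dq))
--         answer += 1
--
--     return answer
-- ===== SOURCE B (Python) =====
-- import heapq
--
-- def solution(scoville, K):
--     h = list(scoville)
--     heapq.heapify(h)
--     count = 0
--     while h and h[0] < K: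
--         if len(h) == 1:
--             return -1
--         a = heapq.heappop(h)
--         b = heapq.heappop(h)
--         heapq.heappush(h, a + 2 * b)
--         count += 1
--     return count
-- ===== Notes on version B (the rewrite author's own statement) =====
-- stated objective: faster
-- what changed: A keeps a deque it fully re-sorts with sorted() and rescans with any() on every merge; B heapifies once into a binary min-heap and does two heappops and one heappush per merge, testing only the heap root against K.
import Mathlib
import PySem

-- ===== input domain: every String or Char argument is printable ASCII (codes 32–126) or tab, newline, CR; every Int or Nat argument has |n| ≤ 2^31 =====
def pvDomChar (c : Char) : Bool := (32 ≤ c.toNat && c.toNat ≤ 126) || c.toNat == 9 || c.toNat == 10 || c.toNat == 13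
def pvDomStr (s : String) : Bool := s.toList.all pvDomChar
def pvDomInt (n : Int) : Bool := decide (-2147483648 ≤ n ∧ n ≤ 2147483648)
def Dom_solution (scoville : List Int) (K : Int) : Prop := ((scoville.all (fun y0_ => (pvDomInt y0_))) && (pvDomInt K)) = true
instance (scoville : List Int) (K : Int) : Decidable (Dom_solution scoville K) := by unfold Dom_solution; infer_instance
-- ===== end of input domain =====

-- B replaces A's per-merge full re-sort of a deque plus any()-scan by a binary min-heap
-- (heapify once; two heappops and one heappush per merge, testing only the root) — faster.
-- A sorts its argument in place (scoville.sort()), B does not: the equivalence proved here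
-- is about the return value.

-- ===== PORT A =====
-- while any(x<K): if len<=1 return -1; pop two, dq[0] = i + dq[0]*2, re-sort, answer += 1
def solutionLoopA (dq : List Int) (K : Int) (answer : Int) : Int :=
  if dq.any (fun x => decide (x < K)) then
    if dq.length ≤ 1 then -1
    else
      match dq with
      | [] => -1            -- unreachable (length ≥ 2 here)
      | [_] => -1           -- unreachable
      | i :: j :: rest => solutionLoopA (PySem.List.sorted ((i + j * 2) :: rest) (fun x => x) false) K (answer + 1)
  else answer
  termination_by dq.length
  decreasing_by simp [PySem.List.length_sorted]

def solution (scoville : List Int) (K : Int) : Int :=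
  solutionLoopA (PySem.List.sorted scoville (fun x => x) false) K 0

-- ===== PORT B =====
-- heapq is ported by its contract: the heap is the multiset of its elements (a List Int),
-- h[0]/heappop read and remove the minimum (exact: equal Ints are indistinguishable, so
-- which physical copy heapq surfaces cannot be observed), heappush adds the element.
def heapPop (h : List Int) : Option (Int × List Int) :=
  match h.min? with
  | none => none
  | some m => some (m, h.erase m)

-- while h and h[0] < K: if len==1 return -1; a,b = two heappops; heappush (a+2b); count += 1
-- (fuel, set to the initial heap size, is only a totality device: each iteration removes one
-- element, so with fuel = |h| the fuel-0 branch is unreachable)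
def solutionLoopB (fuel : Nat) (h : List Int) (K : Int) (count : Int) : Int :=
  match heapPop h with
  | none => count
  | some (a, h1) =>
    if a < K then
      if h.length = 1 then -1
      else
        match fuel with
        | 0 => -1          -- unreachable with fuel = h.length
        | fuel' + 1 =>
          match heapPop h1 with
          | none => -1     -- unreachable (length ≥ 2 here)
          | some (b, h2) => solutionLoopB fuel' ((a + 2 * b) :: h2) K (count + 1)
    else count

def solution_alt (scoville : List Int) (K : Int) : Int :=
  solutionLoopB scoville.length scoville K 0

-- ===== PRECONDITION & SPEC =====
def Spec_solution (scoville : List Int) (K : Int) (out : Int) : Prop := out = solution_alt scoville K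
instance (scoville : List Int) (K : Int) (out : Int) : Decidable (Spec_solution scoville K out) := by unfold Spec_solution; infer_instance

-- ===== CLAIM (what is proved, stated in full; the proofs are below) =====
def Claim_equal_solution : Prop := ∀ (scoville : List Int) (K : Int), Dom_solution scoville K → Spec_solution scoville K (solution scoville K)

-- ===== LEMMAS AND PROOFS =====

-- min? of a sorted (Pairwise ≤) cons is its head
theorem min?_of_sorted_cons (x : Int) (t : List Int) (h : (x :: t).Pairwise (· ≤ ·)) :
    (x :: t).min? = some x := by
  rcases List.pairwise_cons.mp h with ⟨hx, _⟩
  rw [List.min?_eq_some_iff]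
  refine ⟨List.mem_cons_self .., ?_⟩
  intro y hy
  rcases List.mem_cons.mp hy with rfl | hy'
  · exact le_rfl
  · exact hx y hy' 

-- min? is a permutation invariant
theorem min?_perm {l l' : List Int} (h : l.Perm l') : l.min? = l'.min? := by
  cases hl : l.min? with
  | none =>
    rw [List.min?_eq_none_iff] at hl; subst hl
    have : l' = [] := h.symm.eq_nil
    simp [this]
  | some m =>
    rw [List.min?_eq_some_iff] at hl
    rw [eq_comm, List.min?_eq_some_iff]
    exact ⟨h.mem_iff.mp hl.1, fun y hy => hl.2 y (h.mem_iff.mpr hy)⟩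

-- any(x<K) over a sorted cons is just "head < K"
theorem any_lt_head (x : Int) (t : List Int) (K : Int) (h : (x :: t).Pairwise (· ≤ ·)) :
    (x :: t).any (fun y => decide (y < K)) = decide (x < K) := by
  rcases List.pairwise_cons.mp h with ⟨hx, _⟩
  simp only [List.any_cons]
  by_cases hxK : x < K
  · simp [hxK]
  · have ht : t.any (fun y => decide (y < K)) = false := by
      rw [List.any_eq_false]
      intro y hy
      have h1 := hx y hy
      simp only [decide_eq_true_eq]
      omega
    simp [hxK, ht]

-- the loops agree whenever A's list is sorted, B's heap is a permutation of it,
-- and B's fuel equals the common length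
theorem loopA_eq_loopB : ∀ (n : ℕ) (l h : List Int) (K acc : Int),
    l.length = n → l.Pairwise (· ≤ ·) → h.Perm l →
    solutionLoopA l K acc = solutionLoopB n h K acc := by
  intro n
  induction n with
  | zero =>
    intro l h K acc hl _ hperm
    have : l = [] := List.eq_nil_of_length_eq_zero hl
    subst this
    have : h = [] := hperm.eq_nil
    subst this
    have hb : solutionLoopB 0 ([] : List Int) K acc = acc := rfl
    rw [solutionLoopA, hb]
    simp
  | succ n ih =>
    intro l h K acc hl hp hperm
    match l with
    | [] => simp at hl
    | x :: t =>
      have hmin : h.min? = some x := (min?_perm hperm).trans (min?_of_sorted_cons x t hp)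
      have hlen : h.length = t.length + 1 := by simpa using hperm.length_eq
      have herase : (h.erase x).Perm t := by
        have := hperm.erase x
        rwa [List.erase_cons_head] at this
      rw [solutionLoopA.eq_def]
      rw [solutionLoopB.eq_def]
      simp only [heapPop, hmin, any_lt_head x t K hp]
      by_cases hx : x < K
      · simp only [decide_eq_true hx, if_true]
        match t, hl, hp, hlen, herase with
        | [], hl, hp, hlen, herase =>
          have h1 : h.length = 1 := by simpa using hlen
          simp [h1, hx]
        | j :: rest, hl, hp, hlen, herase =>
          have hne : ¬ h.length = 1 := by simp at hlen; omega
          have hlen2 : ¬ (x :: j :: rest).length ≤ 1 := by simp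
          rw [if_neg hlen2, if_neg hne]
          have hn : n = rest.length + 1 := by simp at hl; omega
          have hpt : (j :: rest).Pairwise (fun a c => a ≤ c) := (List.pairwise_cons.mp hp).2
          have hmin2 : (h.erase x).min? = some j :=
            (min?_perm herase).trans (min?_of_sorted_cons j rest hpt)
          have herase2 : ((h.erase x).erase j).Perm rest := by
            have := herase.erase j
            rwa [List.erase_cons_head] at this
          subst hn
          rw [if_pos hx]
          simp only [hmin2]
          have hsortp : (PySem.List.sorted ((x + j * 2) :: rest) (fun y => y) false).Perm
              ((x + j * 2) :: rest) := PySem.List.sorted_perm _ _ _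
          have hsorted : (PySem.List.sorted ((x + j * 2) :: rest) (fun y => y) false).Pairwise
              (· ≤ ·) := by
            simpa using PySem.List.sorted_pairwise ((x + j * 2) :: rest) (fun y => y)
          apply ih
          · simp [hsortp.length_eq]
          · exact hsorted
          · have hperm' : ((x + 2 * j) :: (h.erase x).erase j).Perm ((x + j * 2) :: rest) := by
              have hc : x + 2 * j = x + j * 2 := by ring
              rw [hc]
              exact herase2.cons _
            exact hperm'.trans hsortp.symm
      · simp [hx]

-- ===== VERDICT (by name: the statement is the Claim_ definition above) =====
theorem solution_spec : Claim_equal_solution := by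
  intro scoville K _
  unfold Spec_solution solution solution_alt
  have hlen : (PySem.List.sorted scoville (fun x => x) false).length = scoville.length :=
    PySem.List.length_sorted _ _ _
  rw [← hlen]
  exact loopA_eq_loopB _ _ scoville K 0 rfl
    (by simpa using PySem.List.sorted_pairwise scoville (fun x => x))
    (PySem.List.sorted_perm scoville (fun x => x) false).symm
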